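-- pv_equiv track=rewrite | github.com/DavidAcosta-dev/RE-TeamBuddies | scripts/find_pickup_drop_candidates.py | bfs
-- ===== SOURCE A (Python) =====
-- from collections import defaultdict, deque
--
-- def bfs(graph, seeds, max_depth=4):
--     dist = {}
--     q = deque()
--     for s in seeds:
--         if s not in graph and s not in dist:
--             # still seed, with empty edges assumed
--             dist[s] = 0
--         else:
--             dist[s] = 0
--         q.append(s)
--     while q:
--         cur = q.popleft()
--         d = dist[cur]
--         if d >= max_depth:
--             continue
--         cb, _ = cur
--         for nxt in graph.get(cur, ()):  # same binary only
--             if nxt[0] != cb: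
--                 continue
--             if nxt not in dist:
--                 dist[nxt] = d + 1
--                 q.append(nxt)
--     return dist
-- ===== SOURCE B (Python) =====
-- def bfs(graph, seeds, max_depth=4):
--     # Stage 1: peel off whole BFS levels; distances are never stored during the
--     # traversal -- only a visited set and the list of levels.
--     levels = [list(seeds)]
--     seen = set(seeds)
--     budget = max_depth
--     while budget > 0:
--         budget -= 1
--         cand = [v for u in levels[-1] for v in graph.get(u, ()) if v[0] == u[0]]
--         nxt = list(dict.fromkeys(v for v in cand if v not in seen))
--         if not nxt:
--             break
--         seen.update(nxt)
--         levels.append(nxt)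
--     # Stage 2: the distance of a node is the index of its level.
--     return {v: d for d, level in enumerate(levels) for v in level}
-- ===== Notes on version B (the rewrite author's own statement) =====
-- stated objective: alternative
-- what changed: B never stores a distance during the traversal: it first peels the reachable nodes into whole BFS levels using only a visited set (each level built as a batch by flatMap-filter-dedup over the previous one), and only afterwards builds the distance dict in a single comprehension assigning each node the index of its level; A interleaves a FIFO deque with per-node stored distances and a depth guard.
import Mathlib
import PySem

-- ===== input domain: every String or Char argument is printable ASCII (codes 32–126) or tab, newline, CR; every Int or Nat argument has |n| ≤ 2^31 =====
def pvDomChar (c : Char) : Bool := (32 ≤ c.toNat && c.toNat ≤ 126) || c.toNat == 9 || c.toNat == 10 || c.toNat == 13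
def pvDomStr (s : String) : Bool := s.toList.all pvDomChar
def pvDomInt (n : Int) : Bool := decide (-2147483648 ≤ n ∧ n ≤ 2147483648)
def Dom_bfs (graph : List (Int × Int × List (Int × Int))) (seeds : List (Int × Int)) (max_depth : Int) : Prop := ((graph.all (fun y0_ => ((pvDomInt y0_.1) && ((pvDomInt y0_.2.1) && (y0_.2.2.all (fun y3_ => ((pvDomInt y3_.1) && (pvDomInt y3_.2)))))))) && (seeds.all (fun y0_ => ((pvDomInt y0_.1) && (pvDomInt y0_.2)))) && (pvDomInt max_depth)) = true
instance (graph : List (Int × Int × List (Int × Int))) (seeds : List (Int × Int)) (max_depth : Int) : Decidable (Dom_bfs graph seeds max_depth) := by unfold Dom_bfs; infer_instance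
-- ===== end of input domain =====

-- B replaces A's deque BFS (per-node stored distances and a d >= max_depth guard) by two stages:
-- peel off whole BFS levels with only a visited set, then derive every distance as its level's index.

-- ===== PORT A =====
-- graph.get(cur, ()): first-match lookup in the association list (Python dict)
def pvAdjGet (graph : List (Int × Int × List (Int × Int))) (cur : Int × Int) : List (Int × Int) :=
  match graph with
  | [] => []
  | e :: rest => if (e.1, e.2.1) = cur then e.2.2 else pvAdjGet rest cur

-- 's in graph' (dict-key membership)
def pvHasKey (graph : List (Int × Int × List (Int × Int))) (s : Int × Int) : Bool :=
  graph.any (fun e => (e.1, e.2.1) = s)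

-- the 'while q:' loop; fuel is an upper bound on queue pops (adequacy proved below)
def bfsLoopA (graph : List (Int × Int × List (Int × Int))) (max_depth : Int) :
    Nat → PySem.Dict (Int × Int) Int → List (Int × Int) → PySem.Dict (Int × Int) Int
  | 0, dist, _ => dist
  | _ + 1, dist, [] => dist
  | fuel + 1, dist, cur :: rest =>
      -- d = dist[cur]; cur is always a key here (every queued node was inserted first), so getD's
      -- default is never consulted
      let d := (dist.get? cur).getD 0
      if max_depth ≤ d then bfsLoopA graph max_depth fuel dist rest
      else
        let cb := cur.1
        let st := (pvAdjGet graph cur).foldl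
          (fun (st : PySem.Dict (Int × Int) Int × List (Int × Int)) nxt =>
            if nxt.1 ≠ cb then st
            else if st.1.contains nxt then st
            else (st.1.insert nxt (d + 1), st.2 ++ [nxt])) (dist, rest)
        bfsLoopA graph max_depth fuel st.1 st.2

def bfs (graph : List (Int × Int × List (Int × Int))) (seeds : List (Int × Int)) (max_depth : Int) : List (Int × Int × Int) :=
  -- seeding loop: both branches of A's if set dist[s] = 0; q collects the seeds in order
  let init := seeds.foldl
    (fun (st : PySem.Dict (Int × Int) Int × List (Int × Int)) s =>
      if ¬ pvHasKey graph s ∧ ¬ st.1.contains s then (st.1.insert s 0, st.2 ++ [s])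
      else (st.1.insert s 0, st.2 ++ [s]))
    (PySem.Dict.empty, [])
  let fuel := seeds.length + (graph.map (fun e => e.2.2.length)).sum
  (bfsLoopA graph max_depth fuel init.1 init.2).items.map (fun p => (p.1.1, p.1.2, p.2))

-- ===== PORT B =====
-- the 'while budget > 0:' level loop: acc ++ [last] mirrors the growing 'levels' list (last = levels[-1])
def bfsLoopB (graph : List (Int × Int × List (Int × Int))) :
    Nat → List (List (Int × Int)) → List (Int × Int) → PySem.Set (Int × Int) → List (List (Int × Int))
  | 0, acc, last, _ => acc ++ [last]
  | budget + 1, acc, last, seen =>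
      let cand := last.flatMap (fun u => (pvAdjGet graph u).filter (fun v => v.1 == u.1))
      let nxt := PySem.List.dedup (cand.filter (fun v => !(PySem.Set.contains seen v)))
      if nxt = [] then acc ++ [last]
      else bfsLoopB graph budget (acc ++ [last]) nxt (PySem.Set.update seen nxt)

def bfs_alt (graph : List (Int × Int × List (Int × Int))) (seeds : List (Int × Int)) (max_depth : Int) : List (Int × Int × Int) :=
  -- Stage 1: levels = [list(seeds)] peeled forward; Stage 2: {v: d for d, level in enumerate(levels) for v in level}
  let levels := bfsLoopB graph max_depth.toNat [] seeds (PySem.Set.ofList seeds)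
  ((PySem.List.enumerate levels).foldl
    (fun (d : PySem.Dict (Int × Int) Int) p => p.2.foldl (fun d v => d.insert v p.1) d)
    PySem.Dict.empty).items.map (fun p => (p.1.1, p.1.2, p.2))

-- ===== PRECONDITION & SPEC =====
def Spec_bfs (graph : List (Int × Int × List (Int × Int))) (seeds : List (Int × Int)) (max_depth : Int) (out : List (Int × Int × Int)) : Prop := out = bfs_alt graph seeds max_depth
instance (graph : List (Int × Int × List (Int × Int))) (seeds : List (Int × Int)) (max_depth : Int) (out : List (Int × Int × Int)) : Decidable (Spec_bfs graph seeds max_depth out) := by unfold Spec_bfs; infer_instance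

-- ===== CLAIM (what is proved, stated in full; the proofs are below) =====
def Claim_equal_bfs : Prop := ∀ (graph : List (Int × Int × List (Int × Int))) (seeds : List (Int × Int)) (max_depth : Int), Dom_bfs graph seeds max_depth → Spec_bfs graph seeds max_depth (bfs graph seeds max_depth)

-- ===== LEMMAS AND PROOFS =====

-- proof-only middle model: the level-synchronous BFS carrying the dict explicitly
def pvInner (graph : List (Int × Int × List (Int × Int))) (depth : Int)
    (st : PySem.Dict (Int × Int) Int × List (Int × Int)) (cur : Int × Int) :
    PySem.Dict (Int × Int) Int × List (Int × Int) :=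
  (pvAdjGet graph cur).foldl
    (fun st nxt =>
      if nxt.1 = cur.1 ∧ ¬ st.1.contains nxt
      then (st.1.insert nxt (depth + 1), st.2 ++ [nxt]) else st) st

def pvExpand (graph : List (Int × Int × List (Int × Int))) (depth : Int)
    (dist : PySem.Dict (Int × Int) Int) (frontier : List (Int × Int)) :
    PySem.Dict (Int × Int) Int × List (Int × Int) :=
  frontier.foldl (pvInner graph depth) (dist, [])

def bfsLevels (graph : List (Int × Int × List (Int × Int))) :
    Nat → Int → PySem.Dict (Int × Int) Int → List (Int × Int) → PySem.Dict (Int × Int) Int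
  | 0, _, dist, _ => dist
  | n + 1, depth, dist, frontier =>
      if frontier = [] then dist
      else
        let st := pvExpand graph depth dist frontier
        bfsLevels graph n (depth + 1) st.1 st.2

-- B-side proof model: candidate stream of a level, online step, new-node list, level peeling, dict build
def pvCand (graph : List (Int × Int × List (Int × Int))) (front : List (Int × Int)) : List (Int × Int) :=
  front.flatMap (fun u => (pvAdjGet graph u).filter (fun v => v.1 == u.1))

def pvStep (depth : Int) (st : PySem.Dict (Int × Int) Int × List (Int × Int)) (v : Int × Int) :
    PySem.Dict (Int × Int) Int × List (Int × Int) :=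
  if st.1.contains v then st else (st.1.insert v (depth + 1), st.2 ++ [v])

def pvNewL (dist : PySem.Dict (Int × Int) Int) (c : List (Int × Int)) : List (Int × Int) :=
  PySem.List.dedup (c.filter (fun v => !(dist.contains v)))

def pvPeel (graph : List (Int × Int × List (Int × Int))) :
    Nat → List (Int × Int) → PySem.Set (Int × Int) → List (List (Int × Int))
  | 0, _, _ => []
  | n + 1, last, seen =>
      let nxt := PySem.List.dedup ((pvCand graph last).filter (fun v => !(PySem.Set.contains seen v)))
      if nxt = [] then []
      else nxt :: pvPeel graph n nxt (PySem.Set.update seen nxt)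

def pvBuild (d : PySem.Dict (Int × Int) Int) (depth : Int) :
    List (List (Int × Int)) → PySem.Dict (Int × Int) Int
  | [] => d
  | lvl :: rest => pvBuild (lvl.foldl (fun d v => d.insert v depth) d) (depth + 1) rest

-- all neighbour occurrences in the graph (a superset of everything BFS can ever insert beyond the seeds)
def pvAllN (graph : List (Int × Int × List (Int × Int))) : List (Int × Int) :=
  graph.flatMap (fun e => e.2.2)

-- distinct potential new keys not yet in dist
def pvPool (graph : List (Int × Int × List (Int × Int))) (dist : PySem.Dict (Int × Int) Int) : List (Int × Int) :=
  (pvAllN graph).dedup.filter (fun x => ¬ dist.contains x)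

-- exact number of queue pops A performs, computed level by level (proof-only helper)
def pvNeed (graph : List (Int × Int × List (Int × Int))) :
    Nat → Int → PySem.Dict (Int × Int) Int → List (Int × Int) → Nat
  | 0, _, _, front => front.length
  | n + 1, depth, dist, front =>
      if front = [] then 0
      else front.length +
        pvNeed graph n (depth + 1) (pvExpand graph depth dist front).1 (pvExpand graph depth dist front).2

theorem bfsLoopA_nil (graph : List (Int × Int × List (Int × Int))) (max_depth : Int)
    (fuel : Nat) (dist : PySem.Dict (Int × Int) Int) :
    bfsLoopA graph max_depth fuel dist [] = dist := by
  cases fuel <;> rfl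

theorem bfsLevels_nil (graph : List (Int × Int × List (Int × Int))) (n : Nat) (depth : Int)
    (dist : PySem.Dict (Int × Int) Int) :
    bfsLevels graph n depth dist [] = dist := by
  cases n <;> rfl

-- A's inner neighbour loop body equals the level model's
theorem innerA_eq_innerB (graph : List (Int × Int × List (Int × Int))) (depth : Int)
    (cur : Int × Int) (st : PySem.Dict (Int × Int) Int × List (Int × Int)) :
    (pvAdjGet graph cur).foldl
      (fun (st : PySem.Dict (Int × Int) Int × List (Int × Int)) nxt =>
        if nxt.1 ≠ cur.1 then st
        else if st.1.contains nxt then st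
        else (st.1.insert nxt (depth + 1), st.2 ++ [nxt])) st
    = pvInner graph depth st cur := by
  unfold pvInner
  apply PySem.List.foldl_congr_mem
  intro acc x _
  by_cases h1 : x.1 = cur.1 <;> by_cases h2 : acc.1.contains x <;> simp [h1, h2]

-- the inner fold only appends to the second component
theorem pvInner_append (graph : List (Int × Int × List (Int × Int))) (depth : Int)
    (cur : Int × Int) (dist : PySem.Dict (Int × Int) Int) (q : List (Int × Int)) :
    pvInner graph depth (dist, q) cur
      = ((pvInner graph depth (dist, []) cur).1, q ++ (pvInner graph depth (dist, []) cur).2) := by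
  unfold pvInner
  generalize pvAdjGet graph cur = l
  induction l generalizing dist q with
  | nil => simp
  | cons x l ih =>
      simp only [List.foldl_cons]
      by_cases h : x.1 = cur.1 ∧ ¬ dist.contains x = true
      · simp only [if_pos h, List.nil_append]
        rw [ih _ (q ++ [x]), ih _ [x]]
        simp [List.append_assoc]
      · simp only [if_neg h]
        exact ih dist q

-- one whole level only appends to the second component
theorem pvExpand_append (graph : List (Int × Int × List (Int × Int))) (depth : Int)
    (front : List (Int × Int)) (dist : PySem.Dict (Int × Int) Int) (q : List (Int × Int)) :
    front.foldl (pvInner graph depth) (dist, q)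
      = ((pvExpand graph depth dist front).1, q ++ (pvExpand graph depth dist front).2) := by
  unfold pvExpand
  induction front generalizing dist q with
  | nil => simp
  | cons c front ih =>
      simp only [List.foldl_cons]
      rw [pvInner_append graph depth c dist q, ih]
      have e1 : pvInner graph depth (dist, []) c
          = ((pvInner graph depth (dist, []) c).1, (pvInner graph depth (dist, []) c).2) := rfl
      conv_rhs => rw [e1, ih]
      simp [List.append_assoc]

-- invariant carried through a level expansion, relative to the dict dist0 at the start of the level
def pvInv (graph : List (Int × Int × List (Int × Int))) (depth : Int)
    (dist0 : PySem.Dict (Int × Int) Int) (st : PySem.Dict (Int × Int) Int × List (Int × Int)) : Prop :=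
  st.2.Nodup
  ∧ (∀ x, st.1.contains x = (dist0.contains x || decide (x ∈ st.2)))
  ∧ (∀ x ∈ st.2, dist0.contains x = false ∧ x ∈ pvAllN graph ∧ st.1.get? x = some (depth + 1))
  ∧ (∀ x, dist0.contains x = true → st.1.get? x = dist0.get? x)

theorem pvAdjGet_subset (graph : List (Int × Int × List (Int × Int))) (cur : Int × Int) :
    ∀ x ∈ pvAdjGet graph cur, x ∈ pvAllN graph := by
  induction graph with
  | nil => simp [pvAdjGet]
  | cons e rest ih =>
      intro x hx
      simp only [pvAdjGet] at hx
      simp only [pvAllN, List.flatMap_cons, List.mem_append]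
      by_cases h : (e.1, e.2.1) = cur
      · rw [if_pos h] at hx; exact Or.inl hx
      · rw [if_neg h] at hx; exact Or.inr (ih x hx)

theorem pvInv_innerFold (graph : List (Int × Int × List (Int × Int))) (depth : Int)
    (dist0 : PySem.Dict (Int × Int) Int) (cur : Int × Int) :
    ∀ (l : List (Int × Int)) (st : PySem.Dict (Int × Int) Int × List (Int × Int)),
      (∀ y ∈ l, y ∈ pvAllN graph) → pvInv graph depth dist0 st →
      pvInv graph depth dist0
        (l.foldl (fun st nxt =>
          if nxt.1 = cur.1 ∧ ¬ st.1.contains nxt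
          then (st.1.insert nxt (depth + 1), st.2 ++ [nxt]) else st) st) := by
  intro l
  induction l with
  | nil => intro st _ h; exact h
  | cons x l ih =>
      intro st hl hst
      simp only [List.foldl_cons]
      by_cases hc : x.1 = cur.1 ∧ ¬ st.1.contains x
      · rw [if_pos hc]
        apply ih _ (fun y hy => hl y (List.mem_cons_of_mem _ hy))
        obtain ⟨hnd, hcont, helem, hold⟩ := hst
        have hxnotin2 : x ∉ st.2 := by
          intro hmem
          have := hcont x
          simp [hmem] at this
          exact hc.2 this
        have hxd0 : dist0.contains x = false := by
          have := hcont x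
          by_contra hne
          have htrue : dist0.contains x = true := by
            cases h' : dist0.contains x
            · exact absurd h' hne
            · rfl
          rw [htrue] at this
          simp at this
          exact hc.2 this
        refine ⟨?_, ?_, ?_, ?_⟩
        · exact List.Nodup.append hnd (List.nodup_singleton x) (by
            intro a ha hb
            simp at hb
            subst hb
            exact hxnotin2 ha)
        · intro y
          show (st.1.insert x (depth + 1)).contains y = _
          rw [PySem.Dict.contains_insert, hcont y]
          by_cases hy : y = x
          · subst hy; simp [hxd0, hxnotin2]
          · simp [hy, beq_iff_eq]
        · intro y hy
          rcases List.mem_append.mp hy with hy2 | hy1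
          · obtain ⟨h1, h2, h3⟩ := helem y hy2
            refine ⟨h1, h2, ?_⟩
            show (st.1.insert x (depth + 1)).get? y = _
            have hyne : y ≠ x := fun he => hxnotin2 (he ▸ hy2)
            rw [PySem.Dict.get?_insert_of_ne _ _ hyne, h3]
          · simp at hy1
            subst hy1
            exact ⟨hxd0, hl y (List.mem_cons_self), PySem.Dict.get?_insert_self _ _ _⟩
        · intro y hy
          have hyx : y ≠ x := by
            intro h; subst h; rw [hy] at hxd0; cases hxd0
          show (st.1.insert x (depth + 1)).get? y = _
          rw [PySem.Dict.get?_insert_of_ne _ _ hyx]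
          exact hold y hy
      · rw [if_neg hc]
        exact ih st (fun y hy => hl y (List.mem_cons_of_mem _ hy)) hst

theorem pvInv_expandFold (graph : List (Int × Int × List (Int × Int))) (depth : Int)
    (dist0 : PySem.Dict (Int × Int) Int) :
    ∀ (front : List (Int × Int)) (st : PySem.Dict (Int × Int) Int × List (Int × Int)),
      pvInv graph depth dist0 st →
      pvInv graph depth dist0 (front.foldl (pvInner graph depth) st) := by
  intro front
  induction front with
  | nil => intro st h; exact h
  | cons c front ih =>
      intro st hst
      simp only [List.foldl_cons]
      exact ih _ (pvInv_innerFold graph depth dist0 c _ st (pvAdjGet_subset graph c) hst)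

theorem pvInv_expand (graph : List (Int × Int × List (Int × Int))) (depth : Int)
    (dist : PySem.Dict (Int × Int) Int) (front : List (Int × Int)) :
    pvInv graph depth dist (pvExpand graph depth dist front) := by
  unfold pvExpand
  apply pvInv_expandFold
  refine ⟨List.nodup_nil, ?_, ?_, ?_⟩ <;> simp

-- draining the queue once the depth cap is reached
theorem bfsLoopA_drain (graph : List (Int × Int × List (Int × Int))) (max_depth depth : Int)
    (hcap : max_depth ≤ depth) :
    ∀ (l1 : List (Int × Int)) (dist : PySem.Dict (Int × Int) Int) (l2 : List (Int × Int)) (fuel : Nat),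
      (∀ x ∈ l1, dist.get? x = some depth) →
      bfsLoopA graph max_depth (l1.length + fuel) dist (l1 ++ l2)
        = bfsLoopA graph max_depth fuel dist l2 := by
  intro l1
  induction l1 with
  | nil => intro dist l2 fuel _; simp
  | cons cur l1 ih =>
      intro dist l2 fuel h
      have hlen : (cur :: l1).length + fuel = (l1.length + fuel) + 1 := by
        simp [List.length_cons]; omega
      rw [hlen]
      show bfsLoopA graph max_depth ((l1.length + fuel) + 1) dist (cur :: (l1 ++ l2)) = _
      rw [bfsLoopA]
      have hd : ((dist.get? cur).getD 0) = depth := by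
        rw [h cur List.mem_cons_self]; rfl
      rw [hd, if_pos hcap]
      exact ih dist l2 fuel (fun x hx => h x (List.mem_cons_of_mem _ hx))

-- one BFS level of A's queue loop is exactly one pvExpand round
theorem bfsLoopA_level (graph : List (Int × Int × List (Int × Int))) (max_depth depth : Int)
    (hcap : ¬ max_depth ≤ depth) :
    ∀ (l1 : List (Int × Int)) (dist : PySem.Dict (Int × Int) Int) (l2 : List (Int × Int)) (fuel : Nat),
      (∀ x ∈ l1, dist.get? x = some depth) →
      bfsLoopA graph max_depth (l1.length + fuel) dist (l1 ++ l2)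
        = bfsLoopA graph max_depth fuel (pvExpand graph depth dist l1).1
            (l2 ++ (pvExpand graph depth dist l1).2) := by
  intro l1
  induction l1 with
  | nil => intro dist l2 fuel _; simp [pvExpand]
  | cons cur l1 ih =>
      intro dist l2 fuel h
      have hlen : (cur :: l1).length + fuel = (l1.length + fuel) + 1 := by
        simp [List.length_cons]; omega
      rw [hlen]
      show bfsLoopA graph max_depth ((l1.length + fuel) + 1) dist (cur :: (l1 ++ l2)) = _
      rw [bfsLoopA]
      have hd : ((dist.get? cur).getD 0) = depth := by
        rw [h cur List.mem_cons_self]; rfl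
      rw [hd, if_neg hcap]
      show bfsLoopA graph max_depth (l1.length + fuel)
          ((pvAdjGet graph cur).foldl
            (fun (st : PySem.Dict (Int × Int) Int × List (Int × Int)) nxt =>
              if nxt.1 ≠ cur.1 then st
              else if st.1.contains nxt then st
              else (st.1.insert nxt (depth + 1), st.2 ++ [nxt])) (dist, l1 ++ l2)).1
          ((pvAdjGet graph cur).foldl
            (fun (st : PySem.Dict (Int × Int) Int × List (Int × Int)) nxt =>
              if nxt.1 ≠ cur.1 then st
              else if st.1.contains nxt then st
              else (st.1.insert nxt (depth + 1), st.2 ++ [nxt])) (dist, l1 ++ l2)).2 = _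
      rw [innerA_eq_innerB graph depth cur (dist, l1 ++ l2),
        pvInner_append graph depth cur dist (l1 ++ l2)]
      set dist1 := (pvInner graph depth (dist, []) cur).1 with hdist1
      set nf1 := (pvInner graph depth (dist, []) cur).2 with hnf1
      have hinv1 : pvInv graph depth dist (pvInner graph depth (dist, []) cur) := by
        apply pvInv_innerFold graph depth dist cur _ _ (pvAdjGet_subset graph cur)
        refine ⟨List.nodup_nil, ?_, ?_, ?_⟩ <;> simp
      have hpres : ∀ x ∈ l1, dist1.get? x = some depth := by
        intro x hx
        have hcont : dist.contains x = true := by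
          rw [PySem.Dict.contains_eq_isSome_get?, h x (List.mem_cons_of_mem _ hx)]; rfl
        rw [hinv1.2.2.2 x hcont]
        exact h x (List.mem_cons_of_mem _ hx)
      rw [List.append_assoc]
      rw [ih dist1 (l2 ++ nf1) fuel hpres]
      have hexp : pvExpand graph depth dist (cur :: l1)
          = ((pvExpand graph depth dist1 l1).1, nf1 ++ (pvExpand graph depth dist1 l1).2) := by
        unfold pvExpand
        simp only [List.foldl_cons]
        have : pvInner graph depth (dist, []) cur = (dist1, nf1) := by rw [hdist1, hnf1]
        rw [this, pvExpand_append]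
        rfl
      rw [hexp]
      simp [List.append_assoc]

-- the queue loop computes the level-synchronous BFS, given enough fuel
theorem bfsLoopA_eq_levels (graph : List (Int × Int × List (Int × Int))) (max_depth : Int) :
    ∀ (n : Nat) (depth : Int) (dist : PySem.Dict (Int × Int) Int) (front : List (Int × Int)) (fuel : Nat),
      (max_depth - depth).toNat = n →
      (∀ x ∈ front, dist.get? x = some depth) →
      pvNeed graph n depth dist front ≤ fuel →
      bfsLoopA graph max_depth fuel dist front = bfsLevels graph n depth dist front := by
  intro n
  induction n with
  | zero =>
      intro depth dist front fuel hn h hfuel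
      have hcap : max_depth ≤ depth := by omega
      simp only [pvNeed] at hfuel
      obtain ⟨k, hk⟩ := Nat.le.dest hfuel
      have hdr := bfsLoopA_drain graph max_depth depth hcap front dist [] k (by simpa using h)
      rw [List.append_nil] at hdr
      rw [← hk, hdr, bfsLoopA_nil]
      rfl
  | succ n ih =>
      intro depth dist front fuel hn h hfuel
      by_cases hfr : front = []
      · subst hfr
        rw [bfsLoopA_nil]
        simp [bfsLevels]
      · have hcap : ¬ max_depth ≤ depth := by omega
        simp only [pvNeed, if_neg hfr] at hfuel
        obtain ⟨k, hk⟩ := Nat.le.dest hfuel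
        have hfuel2 : front.length + (pvNeed graph n (depth + 1) (pvExpand graph depth dist front).1
            (pvExpand graph depth dist front).2 + k) = fuel := by omega
        have hstep := bfsLoopA_level graph max_depth depth hcap front dist []
          (pvNeed graph n (depth + 1) (pvExpand graph depth dist front).1
            (pvExpand graph depth dist front).2 + k) (by simpa using h)
        rw [List.append_nil] at hstep
        rw [← hfuel2, hstep]
        have hinv := pvInv_expand graph depth dist front
        have hnext : ∀ x ∈ (pvExpand graph depth dist front).2,
            (pvExpand graph depth dist front).1.get? x = some (depth + 1) :=
          fun x hx => (hinv.2.2.1 x hx).2.2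
        have hn2 : (max_depth - (depth + 1)).toNat = n := by omega
        rw [List.nil_append]
        rw [ih (depth + 1) _ _ _ hn2 hnext (by omega)]
        conv_rhs => rw [bfsLevels]
        rw [if_neg hfr]

-- counting: a level consumes fresh distinct keys from the pool
theorem pool_step (graph : List (Int × Int × List (Int × Int))) (depth : Int)
    (dist : PySem.Dict (Int × Int) Int) (front : List (Int × Int)) :
    (pvExpand graph depth dist front).2.length
      + (pvPool graph (pvExpand graph depth dist front).1).length
      ≤ (pvPool graph dist).length := by
  obtain ⟨hnd, hcont, helem, _⟩ := pvInv_expand graph depth dist front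
  set nf := (pvExpand graph depth dist front).2 with hnf
  set dist' := (pvExpand graph depth dist front).1 with hdist'
  have hsub : ∀ x ∈ nf, x ∈ pvPool graph dist := by
    intro x hx
    obtain ⟨h1, h2, _⟩ := helem x hx
    simp only [pvPool, List.mem_filter, List.mem_dedup]
    exact ⟨h2, by simp [h1]⟩
  have hpool' : pvPool graph dist' = (pvPool graph dist).filter (fun x => ¬ x ∈ nf) := by
    simp only [pvPool, List.filter_filter]
    apply List.filter_congr
    intro x _
    rw [hcont x]
    by_cases h1 : dist.contains x <;> by_cases h2 : x ∈ nf <;> simp [h1, h2]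
  rw [hpool']
  have hsplit : ((pvPool graph dist).filter (fun x => x ∈ nf)).length
      + ((pvPool graph dist).filter (fun x => ¬ x ∈ nf)).length = (pvPool graph dist).length := by
    have := (List.length_eq_length_filter_add (l := pvPool graph dist)
      (fun x => decide (x ∈ nf))).symm
    simpa [decide_not] using this
  have hperm : List.Perm ((pvPool graph dist).filter (fun x => x ∈ nf)) nf := by
    apply (List.perm_ext_iff_of_nodup _ hnd).mpr
    · intro a
      simp only [List.mem_filter, decide_eq_true_eq]
      constructor
      · exact fun h => h.2
      · intro h; exact ⟨hsub a h, h⟩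
    · exact List.Nodup.filter _ (List.Nodup.filter _ (List.nodup_dedup _))
  have := hperm.length_eq
  omega

theorem pvNeed_le (graph : List (Int × Int × List (Int × Int))) :
    ∀ (n : Nat) (depth : Int) (dist : PySem.Dict (Int × Int) Int) (front : List (Int × Int)),
      pvNeed graph n depth dist front ≤ front.length + (pvPool graph dist).length := by
  intro n
  induction n with
  | zero => intro depth dist front; simp [pvNeed]
  | succ n ih =>
      intro depth dist front
      by_cases hfr : front = []
      · simp [pvNeed, hfr]
      · simp only [pvNeed, if_neg hfr]
        have h1 := ih (depth + 1) (pvExpand graph depth dist front).1 (pvExpand graph depth dist front).2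
        have h2 := pool_step graph depth dist front
        omega

-- A's seeding loop: the dict sets every seed to 0 and the queue is the seed list itself
theorem seed_fold (graph : List (Int × Int × List (Int × Int))) :
    ∀ (seeds : List (Int × Int)) (st : PySem.Dict (Int × Int) Int × List (Int × Int)),
      seeds.foldl
        (fun (st : PySem.Dict (Int × Int) Int × List (Int × Int)) s =>
          if ¬ pvHasKey graph s ∧ ¬ st.1.contains s then (st.1.insert s 0, st.2 ++ [s])
          else (st.1.insert s 0, st.2 ++ [s])) st
      = (seeds.foldl (fun d s => d.insert s 0) st.1, st.2 ++ seeds) := by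
  intro seeds st
  have hcg := PySem.List.foldl_congr_mem (l := seeds) (init := st)
    (f := fun (st : PySem.Dict (Int × Int) Int × List (Int × Int)) s =>
      if ¬ pvHasKey graph s ∧ ¬ st.1.contains s then (st.1.insert s 0, st.2 ++ [s])
      else (st.1.insert s 0, st.2 ++ [s]))
    (g := fun (st : PySem.Dict (Int × Int) Int × List (Int × Int)) s => (st.1.insert s 0, st.2 ++ [s]))
    (by intro acc x _; exact ite_self _)
  rw [hcg]
  rw [PySem.List.foldl_prod_mk (f := fun (d : PySem.Dict (Int × Int) Int) (s : Int × Int) => d.insert s 0)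
    (g := fun (q : List (Int × Int)) (s : Int × Int) => q ++ [s])]
  rw [PySem.List.foldl_append_singleton_eq_self]

theorem seed_get? :
    ∀ (l : List (Int × Int)) (d : PySem.Dict (Int × Int) Int) (x : Int × Int),
      (l.foldl (fun d s => d.insert s 0) d).get? x = if x ∈ l then some 0 else d.get? x := by
  intro l
  induction l with
  | nil => intro d x; simp
  | cons s l ih =>
      intro d x
      simp only [List.foldl_cons]
      rw [ih]
      by_cases hx : x ∈ l
      · simp [hx]
      · rw [if_neg hx, PySem.Dict.get?_insert]
        by_cases hxs : x = s <;> simp [hxs, hx]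

theorem pvPool_le (graph : List (Int × Int × List (Int × Int))) (dist : PySem.Dict (Int × Int) Int) :
    (pvPool graph dist).length ≤ (graph.map (fun e => e.2.2.length)).sum := by
  calc (pvPool graph dist).length
      ≤ (pvAllN graph).dedup.length := List.length_filter_le _ _
    _ ≤ (pvAllN graph).length := (List.dedup_sublist _).length_le
    _ = (graph.map (fun e => e.2.2.length)).sum := by
        simp [pvAllN, List.length_flatMap]

-- ===== bridge: the level-synchronous dict BFS equals B's staged levels =====

-- Set.contains is membership
theorem set_contains_eq (s : PySem.Set (Int × Int)) (x : Int × Int) :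
    PySem.Set.contains s x = decide (x ∈ s) := by
  simp [PySem.Set.contains]

theorem set_add_mem (s : PySem.Set (Int × Int)) (x : Int × Int) (h : x ∈ s) :
    PySem.Set.add s x = s := by
  simp [PySem.Set.add, h]

theorem set_add_not_mem (s : PySem.Set (Int × Int)) (x : Int × Int) (h : x ∉ s) :
    PySem.Set.add s x = s ++ [x] := by
  simp [PySem.Set.add, h]

-- Set.add over a list, with a distinguished head element: dedup's cons law
theorem foldl_add_cons (v : Int × Int) :
    ∀ (l : List (Int × Int)) (s : List (Int × Int)), v ∉ s →
      l.foldl PySem.Set.add (v :: s)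
        = v :: (l.filter (fun x => !(x == v))).foldl PySem.Set.add s := by
  intro l
  induction l with
  | nil => intro s _; simp
  | cons x l ih =>
      intro s hv
      simp only [List.foldl_cons, List.filter_cons]
      by_cases hxv : x = v
      · rw [hxv]
        rw [set_add_mem (v :: s) v List.mem_cons_self]
        have hb : (!(v == v)) = false := by simp
        rw [hb, if_neg (by simp)]
        exact ih s hv
      · have hx : (!(x == v)) = true := by simp [hxv]
        rw [hx, if_pos rfl]
        rw [List.foldl_cons]
        by_cases hm : x ∈ s
        · rw [set_add_mem (v :: s) x (List.mem_cons_of_mem v hm), set_add_mem s x hm]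
          exact ih s hv
        · have hnm : x ∉ v :: s := by
            intro h
            rcases List.mem_cons.mp h with h | h
            · exact hxv h
            · exact hm h
          rw [set_add_not_mem (v :: s) x hnm, set_add_not_mem s x hm]
          show List.foldl PySem.Set.add (v :: (s ++ [x])) l = _
          apply ih
          simp only [List.mem_append, List.mem_singleton]
          rintro (h | h)
          · exact hv h
          · exact hxv h.symm

theorem dedup_cons (v : Int × Int) (l : List (Int × Int)) :
    PySem.List.dedup (v :: l) = v :: PySem.List.dedup (l.filter (fun x => !(x == v))) := by
  simp only [PySem.List.dedup_eq_ofList, PySem.Set.ofList_eq_foldl, List.foldl_cons]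
  have h0 : PySem.Set.add [] v = [v] := by simp [PySem.Set.add]
  rw [h0, foldl_add_cons v l [] (by simp)]

-- the online step fold over any candidate stream: it inserts exactly pvNewL, in order
theorem step_char (depth : Int) :
    ∀ (c : List (Int × Int)) (dist : PySem.Dict (Int × Int) Int) (q : List (Int × Int)),
      c.foldl (pvStep depth) (dist, q)
        = ((pvNewL dist c).foldl (fun d v => d.insert v (depth + 1)) dist,
           q ++ pvNewL dist c) := by
  intro c
  induction c with
  | nil => intro dist q; simp [pvNewL, PySem.List.dedup_eq_ofList, PySem.Set.ofList_eq_foldl]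
  | cons v rest ih =>
      intro dist q
      simp only [List.foldl_cons]
      by_cases hc : dist.contains v
      · have h1 : pvStep depth (dist, q) v = (dist, q) := by simp [pvStep, hc]
        have h2 : pvNewL dist (v :: rest) = pvNewL dist rest := by
          simp [pvNewL, hc]
        rw [h1, h2]
        exact ih dist q
      · have hcf : dist.contains v = false := by
          cases h' : dist.contains v
          · rfl
          · exact absurd h' (by simp [hc])
        have hpv : (!(dist.contains v)) = true := by rw [hcf]; rfl
        have h1 : pvStep depth (dist, q) v = (dist.insert v (depth + 1), q ++ [v]) := by
          simp [pvStep, hcf]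
        have h2 : pvNewL dist (v :: rest) = v :: pvNewL (dist.insert v (depth + 1)) rest := by
          show PySem.List.dedup ((v :: rest).filter _) = _
          rw [List.filter_cons, if_pos hpv]
          rw [dedup_cons]
          congr 1
          unfold pvNewL
          congr 1
          rw [List.filter_filter]
          apply List.filter_congr
          intro x _
          rw [PySem.Dict.contains_insert]
          cases hx : x == v <;> cases hd : dist.contains x <;> simp [*]
        rw [h1, h2, ih]
        simp only [List.foldl_cons]
        rw [List.append_assoc]
        rfl

-- A's inner loop over one node is the online step fold over its filtered adjacency
theorem inner_step (graph : List (Int × Int × List (Int × Int))) (depth : Int) (u : Int × Int)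
    (st : PySem.Dict (Int × Int) Int × List (Int × Int)) :
    pvInner graph depth st u
      = ((pvAdjGet graph u).filter (fun v => v.1 == u.1)).foldl (pvStep depth) st := by
  unfold pvInner
  rw [List.foldl_filter]
  apply PySem.List.foldl_congr_mem
  intro acc x _
  by_cases h1 : x.1 = u.1 <;> by_cases h2 : acc.1.contains x <;>
    simp [pvStep, h1, h2]

-- one whole level is the online step fold over the level's candidate stream
theorem expand_step (graph : List (Int × Int × List (Int × Int))) (depth : Int) :
    ∀ (front : List (Int × Int)) (st : PySem.Dict (Int × Int) Int × List (Int × Int)),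
      front.foldl (pvInner graph depth) st = (pvCand graph front).foldl (pvStep depth) st := by
  intro front
  induction front with
  | nil => intro st; simp [pvCand]
  | cons u front ih =>
      intro st
      simp only [List.foldl_cons, pvCand, List.flatMap_cons, List.foldl_append]
      rw [inner_step]
      exact ih _

theorem expand_char (graph : List (Int × Int × List (Int × Int))) (depth : Int)
    (dist : PySem.Dict (Int × Int) Int) (front : List (Int × Int)) :
    pvExpand graph depth dist front
      = ((pvNewL dist (pvCand graph front)).foldl (fun d v => d.insert v (depth + 1)) dist,
         pvNewL dist (pvCand graph front)) := by
  unfold pvExpand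
  rw [expand_step, step_char]
  rfl

theorem contains_fold_ins (l : List (Int × Int)) (dist : PySem.Dict (Int × Int) Int)
    (depth : Int) (x : Int × Int) :
    (l.foldl (fun d v => d.insert v (depth + 1)) dist).contains x
      = (dist.contains x || decide (x ∈ l)) := by
  rw [PySem.Dict.contains_eq_decide_mem_keys,
    PySem.Dict.keys_foldl_insert l (fun _ _ => depth + 1) dist,
    PySem.Dict.contains_eq_decide_mem_keys]
  by_cases h : x ∈ PySem.Set.update dist.keys l
  · rcases (PySem.Set.mem_update _ _ _).mp h with h' | h' <;> simp [h, h']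
  · have h1 : x ∉ dist.keys := fun h' => h ((PySem.Set.mem_update _ _ _).mpr (Or.inl h'))
    have h2 : x ∉ l := fun h' => h ((PySem.Set.mem_update _ _ _).mpr (Or.inr h'))
    simp [h, h1, h2]

-- the B port's loop is [] ++ last :: the peeled tail
theorem loopB_acc (graph : List (Int × Int × List (Int × Int))) :
    ∀ (n : Nat) (acc : List (List (Int × Int))) (last : List (Int × Int)) (seen : PySem.Set (Int × Int)),
      bfsLoopB graph n acc last seen = acc ++ last :: pvPeel graph n last seen := by
  intro n
  induction n with
  | zero => intro acc last seen; rfl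
  | succ n ih =>
      intro acc last seen
      show bfsLoopB graph (n + 1) acc last seen = _
      rw [bfsLoopB]
      simp only [pvPeel, pvCand]
      by_cases h : PySem.List.dedup
          ((last.flatMap (fun u => (pvAdjGet graph u).filter (fun v => v.1 == u.1))).filter
            (fun v => !(PySem.Set.contains seen v))) = []
      · rw [if_pos h, if_pos h]
      · rw [if_neg h, if_neg h, ih]
        simp

-- the final dict comprehension over enumerate(levels) is pvBuild
theorem enum_build :
    ∀ (levels : List (List (Int × Int))) (s : Int) (d : PySem.Dict (Int × Int) Int),
      (PySem.List.enumerate levels s).foldl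
        (fun (d : PySem.Dict (Int × Int) Int) p => p.2.foldl (fun d v => d.insert v p.1) d) d
      = pvBuild d s levels := by
  intro levels
  induction levels with
  | nil => intro s d; rw [PySem.List.enumerate_nil]; rfl
  | cons lvl rest ih =>
      intro s d
      rw [PySem.List.enumerate_cons, List.foldl_cons]
      exact ih (s + 1) _

-- the dict-carrying level BFS equals: build the peeled levels onto the current dict
theorem levels_eq_build (graph : List (Int × Int × List (Int × Int))) :
    ∀ (n : Nat) (depth : Int) (dist : PySem.Dict (Int × Int) Int)
      (front : List (Int × Int)) (seen : PySem.Set (Int × Int)),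
      (∀ x, dist.contains x = PySem.Set.contains seen x) →
      bfsLevels graph n depth dist front = pvBuild dist (depth + 1) (pvPeel graph n front seen) := by
  intro n
  induction n with
  | zero => intro depth dist front seen _; rfl
  | succ n ih =>
      intro depth dist front seen hsame
      have hfilter : (pvCand graph front).filter (fun v => !(dist.contains v))
          = (pvCand graph front).filter (fun v => !(PySem.Set.contains seen v)) := by
        apply List.filter_congr
        intro x _
        rw [hsame x]
      have hnxt : pvNewL dist (pvCand graph front)
          = PySem.List.dedup ((pvCand graph front).filter (fun v => !(PySem.Set.contains seen v))) := by
        rw [pvNewL, hfilter]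
      show bfsLevels graph (n + 1) depth dist front = _
      rw [bfsLevels]
      by_cases hfr : front = []
      · rw [if_pos hfr]
        subst hfr
        have hcand : pvCand graph ([] : List (Int × Int)) = [] := rfl
        simp only [pvPeel, hcand]
        rw [show (([] : List (Int × Int)).filter (fun v => !(PySem.Set.contains seen v))) = [] from rfl]
        rw [show PySem.List.dedup ([] : List (Int × Int)) = [] from rfl]
        simp [pvBuild]
      · rw [if_neg hfr]
        simp only [pvPeel]
        rw [← hnxt]
        set nxt := pvNewL dist (pvCand graph front) with hdefnxt
        have hst : pvExpand graph depth dist front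
            = (nxt.foldl (fun d v => d.insert v (depth + 1)) dist, nxt) := by
          rw [expand_char, ← hdefnxt]
        by_cases hempty : nxt = []
        · rw [if_pos hempty]
          show bfsLevels graph n (depth + 1) (pvExpand graph depth dist front).1
            (pvExpand graph depth dist front).2 = _
          rw [hst, hempty]
          simp only [List.foldl_nil]
          rw [bfsLevels_nil]
          rfl
        · rw [if_neg hempty]
          show bfsLevels graph n (depth + 1) (pvExpand graph depth dist front).1
            (pvExpand graph depth dist front).2 = _
          rw [hst]
          have hsame' : ∀ x, (nxt.foldl (fun d v => d.insert v (depth + 1)) dist).contains x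
              = PySem.Set.contains (PySem.Set.update seen nxt) x := by
            intro x
            rw [contains_fold_ins, hsame x, set_contains_eq, set_contains_eq]
            by_cases h1 : x ∈ seen <;> by_cases h2 : x ∈ nxt <;>
              simp [h1, h2, PySem.Set.mem_update]
          rw [ih (depth + 1) (nxt.foldl (fun d v => d.insert v (depth + 1)) dist) nxt
            (PySem.Set.update seen nxt) hsame']
          rfl

-- assembly: A's queue BFS = level BFS = B's staged levels
theorem bfs_eq_alt (graph : List (Int × Int × List (Int × Int))) (seeds : List (Int × Int)) (max_depth : Int) :
    bfs graph seeds max_depth = bfs_alt graph seeds max_depth := by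
  unfold bfs bfs_alt
  rw [seed_fold graph seeds (PySem.Dict.empty, [])]
  simp only [List.nil_append]
  have hfuel : pvNeed graph max_depth.toNat 0
      (seeds.foldl (fun d s => d.insert s 0) PySem.Dict.empty) seeds
      ≤ seeds.length + (graph.map (fun e => e.2.2.length)).sum := by
    have h1 := pvNeed_le graph max_depth.toNat 0
      (seeds.foldl (fun d s => d.insert s 0) PySem.Dict.empty) seeds
    have h2 := pvPool_le graph (seeds.foldl (fun d s => d.insert s 0) PySem.Dict.empty)
    omega
  rw [bfsLoopA_eq_levels graph max_depth max_depth.toNat 0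
    (seeds.foldl (fun d s => d.insert s 0) PySem.Dict.empty) seeds _
    (by omega) (fun x hx => by rw [seed_get?]; simp [hx]) hfuel]
  rw [loopB_acc, List.nil_append, enum_build]
  show _ = (pvBuild ((PySem.Dict.empty : PySem.Dict (Int × Int) Int)) 0
      (seeds :: pvPeel graph max_depth.toNat seeds (PySem.Set.ofList seeds))).items.map _
  rw [show pvBuild ((PySem.Dict.empty : PySem.Dict (Int × Int) Int)) 0
      (seeds :: pvPeel graph max_depth.toNat seeds (PySem.Set.ofList seeds))
    = pvBuild (seeds.foldl (fun d v => d.insert v 0) PySem.Dict.empty) 1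
      (pvPeel graph max_depth.toNat seeds (PySem.Set.ofList seeds)) from rfl]
  have hsame : ∀ x, ((seeds.foldl (fun (d : PySem.Dict (Int × Int) Int) s => d.insert s 0) PySem.Dict.empty).contains x)
      = PySem.Set.contains (PySem.Set.ofList seeds) x := by
    intro x
    rw [PySem.Dict.contains_eq_isSome_get?, seed_get?, set_contains_eq]
    by_cases hx : x ∈ seeds <;> simp [hx, PySem.Set.mem_ofList]
  rw [levels_eq_build graph max_depth.toNat 0
    (seeds.foldl (fun d s => d.insert s 0) PySem.Dict.empty) seeds (PySem.Set.ofList seeds) hsame]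
  norm_num

-- ===== VERDICT (by name: the statement is the Claim_ definition above) =====
theorem bfs_spec : Claim_equal_bfs := by
  intro graph seeds max_depth _
  unfold Spec_bfs
  exact bfs_eq_alt graph seeds max_depth
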